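-- pv_equiv track=rewrite | github.com/haolunc/ARC-RL | reference_solutions/solutions/aa62e3f4.py | transform
-- ===== SOURCE A (Python) =====
-- def transform(grid):
--
--     h = len(grid)
--     w = len(grid[0])
--
--     from collections import Counter
--     flat = [c for row in grid for c in row]
--     freq = Counter(flat)
--
--     background, _ = freq.most_common(1)[0]
--
--     non_bg = {c: cnt for c, cnt in freq.items() if c != background}
--
--     border = max(non_bg, key=non_bg.get)
--
--     target = min(non_bg, key=non_bg.get)
--
--     out = [[background for _ in range(w)] for _ in range(h)]
--
--     for i in range(h):
--         cols = [j for j in range(w) if grid[i][j] == border]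
--         if not cols:
--             continue
--         L = min(cols)
--         R = max(cols)
--         if L - 1 >= 0:
--             out[i][L - 1] = target
--         if R + 1 < w:
--             out[i][R + 1] = target
--
--     for j in range(w):
--         rows = [i for i in range(h) if grid[i][j] == border]
--         if not rows:
--             continue
--         T = min(rows)
--         B = max(rows)
--         if T - 1 >= 0:
--             out[T - 1][j] = target
--         if B + 1 < h:
--             out[B + 1][j] = target
--
--     return out
-- ===== SOURCE B (Python) =====
-- def transform(grid):
--     h = len(grid)
--     w = len(grid[0])
--
--     counts = {}
--     for row in grid:
--         for c in row:
--             counts[c] = counts.get(c, 0) + 1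
--
--     background, _ = max(counts.items(), key=lambda kv: kv[1])
--
--     non_bg = {c: cnt for c, cnt in counts.items() if c != background}
--
--     border = max(non_bg.items(), key=lambda kv: kv[1])[0]
--     target = min(non_bg.items(), key=lambda kv: kv[1])[0]
--
--     # one combined pass: record per-row and per-column extremes of the border colour
--     row_ext = {}  # i -> (leftmost, rightmost) border column in row i
--     col_ext = {}  # j -> (topmost, bottommost) border row in column j
--     for i in range(h):
--         for j in range(w):
--             if grid[i][j] == border:
--                 if i in row_ext:
--                     L, R = row_ext[i]
--                     row_ext[i] = (min(L, j), max(R, j))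
--                 else:
--                     row_ext[i] = (j, j)
--                 if j in col_ext:
--                     T, B = col_ext[j]
--                     col_ext[j] = (min(T, i), max(B, i))
--                 else:
--                     col_ext[j] = (i, i)
--
--     out = [[background] * w for _ in range(h)]
--     for i, (L, R) in row_ext.items():
--         if L - 1 >= 0:
--             out[i][L - 1] = target
--         if R + 1 < w:
--             out[i][R + 1] = target
--     for j, (T, B) in col_ext.items():
--         if T - 1 >= 0:
--             out[T - 1][j] = target
--         if B + 1 < h:
--             out[B + 1][j] = target
--     return out
-- ===== Notes on version B (the rewrite author's own statement) =====
-- stated objective: alternative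
-- what changed: The two separate marking passes (per-row column scans, then per-column row scans, each rebuilding an index list and taking min/max) are replaced by one combined pass over all cells that records per-row and per-column border extremes in two dictionaries, which are then walked once to place the target marks; the colour-selection prologue uses a plain dict and max/min over items instead of Counter.most_common and key-wise max/min.
import Mathlib
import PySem

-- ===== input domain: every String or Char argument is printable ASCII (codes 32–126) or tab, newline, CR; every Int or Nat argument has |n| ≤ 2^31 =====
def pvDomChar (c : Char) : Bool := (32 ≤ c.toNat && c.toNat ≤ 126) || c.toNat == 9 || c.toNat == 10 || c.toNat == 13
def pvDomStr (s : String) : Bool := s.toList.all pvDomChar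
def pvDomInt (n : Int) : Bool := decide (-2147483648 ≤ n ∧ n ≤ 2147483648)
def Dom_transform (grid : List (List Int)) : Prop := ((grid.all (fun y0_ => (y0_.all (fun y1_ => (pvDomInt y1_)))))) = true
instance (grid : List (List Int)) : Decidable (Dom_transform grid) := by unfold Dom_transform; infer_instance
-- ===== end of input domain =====

-- B re-implements the marking phase as ONE combined pass over the grid recording per-row and
-- per-column border extremes in dictionaries, instead of A's separate per-row and per-column scans
-- (objective: alternative decomposition, same asymptotic cost).

-- shared helpers: Python's grid[i][j] and out[i][j] = v, both used only at in-bounds nonnegative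
-- indices by either program (exact there)
def pvCell (grid : List (List Int)) (i j : Nat) : Int := (grid.getD i []).getD j 0
def pvSet (out : List (List Int)) (i j : Nat) (v : Int) : List (List Int) :=
  out.modify i (fun r => r.set j v)
-- the two guarded writes both Pythons perform for a row extreme (L, R) in row i: Python's
-- 'L - 1 >= 0' on a nonnegative int is '1 ≤ L' here
def pvRowStep (w : Nat) (target : Int) (out : List (List Int)) (i L R : Nat) : List (List Int) :=
  let out1 := if 1 ≤ L then pvSet out i (L - 1) target else out
  if R + 1 < w then pvSet out1 i (R + 1) target else out1
-- the two guarded writes for a column extreme (T, B) in column j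
def pvColStep (h : Nat) (target : Int) (out : List (List Int)) (j T B : Nat) : List (List Int) :=
  let out1 := if 1 ≤ T then pvSet out (T - 1) j target else out
  if B + 1 < h then pvSet out1 (B + 1) j target else out1

-- ===== PORT A =====
-- A-side helpers: the comprehensions [j for j in range(w) if grid[i][j] == border] and
-- [i for i in range(h) if grid[i][j] == border]
def pvColsOf (grid : List (List Int)) (border : Int) (w i : Nat) : List Nat :=
  (List.range w).filter (fun j => pvCell grid i j = border)
def pvRowsOf (grid : List (List Int)) (border : Int) (h j : Nat) : List Nat :=
  (List.range h).filter (fun i => pvCell grid i j = border)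

-- Counter(flat) is PySem.Dict.counter; freq.most_common(1)[0] is the first count-maximal item
-- (heapq.nlargest(1) = stable descending sort, take 1); max/min(non_bg, key=non_bg.get) scan the
-- keys taking the first extremal one; the dict comprehension over freq's (distinct-key) items is
-- the filtered association list. The maxD/minD defaults are never used on inputs in Pre_.
def transform (grid : List (List Int)) : List (List Int) :=
  let h := grid.length
  let w := (grid.headD []).length
  let flat := grid.flatMap (fun row => row)
  let freq := PySem.Dict.counter flat
  let background := (PySem.List.maxD freq.items (fun kv => kv.2) ((0 : Int), (0 : Int))).1
  let non_bg : PySem.Dict Int Int := PySem.Dict.mk (freq.items.filter (fun kv => !(kv.1 == background)))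
  let border := PySem.List.maxD non_bg.keys (fun c => non_bg.getD c 0) 0
  let target := PySem.List.minD non_bg.keys (fun c => non_bg.getD c 0) 0
  let out0 := (List.range h).map (fun _ => (List.range w).map (fun _ => background))
  let out1 := (List.range h).foldl (fun out i =>
    let cols := pvColsOf grid border w i
    if cols = [] then out
    else pvRowStep w target out i (PySem.List.minD cols (fun j => j) 0)
                                  (PySem.List.maxD cols (fun j => j) 0)) out0
  (List.range w).foldl (fun out j =>
    let rows := pvRowsOf grid border h j
    if rows = [] then out
    else pvColStep h target out j (PySem.List.minD rows (fun i => i) 0)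
                                  (PySem.List.maxD rows (fun i => i) 0)) out1

-- ===== PORT B =====
-- B-side helper: the body of B's combined scan ('if grid[i][j] == border: update row_ext, col_ext')
def pvScanStep (grid : List (List Int)) (border : Int)
    (st : PySem.Dict Nat (Nat × Nat) × PySem.Dict Nat (Nat × Nat)) (i j : Nat) :
    PySem.Dict Nat (Nat × Nat) × PySem.Dict Nat (Nat × Nat) :=
  if pvCell grid i j = border then
    (match st.1.get? i with
     | some LR => st.1.insert i (min LR.1 j, max LR.2 j)
     | none => st.1.insert i (j, j),
     match st.2.get? j with
     | some TB => st.2.insert j (min TB.1 i, max TB.2 i)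
     | none => st.2.insert j (i, i))
  else st

def transform_alt (grid : List (List Int)) : List (List Int) :=
  let h := grid.length
  let w := (grid.headD []).length
  let counts := grid.foldl (fun d row => row.foldl (fun d c => d.modify c 0 (fun n => n + 1)) d)
    PySem.Dict.empty
  let background := (PySem.List.maxD counts.items (fun kv => kv.2) ((0 : Int), (0 : Int))).1
  let non_bg : PySem.Dict Int Int := PySem.Dict.mk (counts.items.filter (fun kv => !(kv.1 == background)))
  let border := (PySem.List.maxD non_bg.items (fun kv => kv.2) ((0 : Int), (0 : Int))).1
  let target := (PySem.List.minD non_bg.items (fun kv => kv.2) ((0 : Int), (0 : Int))).1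
  let exts := (List.range h).foldl (fun st i =>
    (List.range w).foldl (fun st j => pvScanStep grid border st i j) st)
    (PySem.Dict.empty, PySem.Dict.empty)
  let out0 := (List.range h).map (fun _ => List.replicate w background)
  let out1 := exts.1.items.foldl (fun out p => pvRowStep w target out p.1 p.2.1 p.2.2) out0
  exts.2.items.foldl (fun out p => pvColStep h target out p.1 p.2.1 p.2.2) out1

-- ===== PRECONDITION & SPEC =====
-- Pre_ is exactly the set of inputs on which the Python A returns normally: A raises IndexError on
-- an empty grid or on a row shorter than the first one, and ValueError (max of an empty sequence)
-- when the grid holds fewer than two distinct colours.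
def Pre_transform (grid : List (List Int)) : Prop :=
  grid ≠ [] ∧
  (∀ row ∈ grid, (grid.headD []).length ≤ row.length) ∧
  (∃ a ∈ grid.flatten, ∃ b ∈ grid.flatten, a ≠ b)
instance (grid : List (List Int)) : Decidable (Pre_transform grid) := by
  unfold Pre_transform; infer_instance
def pvWitness_transform : List (List Int) := [[0, 1], [0, 0]]
def Spec_transform (grid : List (List Int)) (out : List (List Int)) : Prop := out = transform_alt grid
instance (grid : List (List Int)) (out : List (List Int)) : Decidable (Spec_transform grid out) := by
  unfold Spec_transform; infer_instance

-- ===== CLAIM (what is proved, stated in full; the proofs are below) =====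
def Claim_equal_transform : Prop := ∀ (grid : List (List Int)), Dom_transform grid → Pre_transform grid → Spec_transform grid (transform grid)

-- ===== LEMMAS AND PROOFS =====

-- ---- max?/min? via Option.elim (avoids match-matcher unification issues) ----
theorem pv_max?_elim {α κ : Type} [LT κ] [DecidableLT κ] (l : List α) (kf : α → κ) :
    PySem.List.max? l kf =
      l.foldl (fun acc x => acc.elim (some x) (fun m => if kf m < kf x then some x else some m))
        none := by
  unfold PySem.List.max?; congr 1; funext acc x; cases acc <;> rfl

theorem pv_min?_elim {α κ : Type} [LT κ] [DecidableLT κ] (l : List α) (kf : α → κ) :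
    PySem.List.min? l kf =
      l.foldl (fun acc x => acc.elim (some x) (fun m => if kf x < kf m then some x else some m))
        none := by
  unfold PySem.List.min?; congr 1; funext acc x; cases acc <;> rfl

theorem pv_max?_map_fst (l : List (Int × Int)) (g : Int → Int) :
    PySem.List.max? (l.map Prod.fst) g = (PySem.List.max? l (fun p => g p.1)).map Prod.fst := by
  rw [pv_max?_elim, pv_max?_elim]
  have key : ∀ (l : List (Int × Int)) (acc : Option (Int × Int)),
      List.foldl (fun acc x => acc.elim (some x) (fun m => if g m < g x then some x else some m))
        (acc.map Prod.fst) (l.map Prod.fst) =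
      (List.foldl (fun acc x => acc.elim (some x)
          (fun m => if g m.1 < g x.1 then some x else some m)) acc l).map Prod.fst := by
    intro l
    induction l with
    | nil => intro acc; rfl
    | cons p l ih =>
      intro acc
      cases acc with
      | none => simpa using ih (some p)
      | some m =>
        have h2 := ih (if g m.1 < g p.1 then some p else some m)
        rw [apply_ite (Option.map Prod.fst)] at h2
        simpa using h2
  simpa using key l none

theorem pv_min?_map_fst (l : List (Int × Int)) (g : Int → Int) :
    PySem.List.min? (l.map Prod.fst) g = (PySem.List.min? l (fun p => g p.1)).map Prod.fst := by
  rw [pv_min?_elim, pv_min?_elim]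
  have key : ∀ (l : List (Int × Int)) (acc : Option (Int × Int)),
      List.foldl (fun acc x => acc.elim (some x) (fun m => if g x < g m then some x else some m))
        (acc.map Prod.fst) (l.map Prod.fst) =
      (List.foldl (fun acc x => acc.elim (some x)
          (fun m => if g x.1 < g m.1 then some x else some m)) acc l).map Prod.fst := by
    intro l
    induction l with
    | nil => intro acc; rfl
    | cons p l ih =>
      intro acc
      cases acc with
      | none => simpa using ih (some p)
      | some m =>
        have h2 := ih (if g p.1 < g m.1 then some p else some m)
        rw [apply_ite (Option.map Prod.fst)] at h2
        simpa using h2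
  simpa using key l none

theorem pv_max?_congr {α κ : Type} [LT κ] [DecidableLT κ] (l : List α) (k1 k2 : α → κ)
    (h : ∀ x ∈ l, k1 x = k2 x) : PySem.List.max? l k1 = PySem.List.max? l k2 := by
  rw [pv_max?_elim, pv_max?_elim]
  have key : ∀ (l : List α) (acc : Option α), (∀ x ∈ l, k1 x = k2 x) →
      (∀ x, acc = some x → k1 x = k2 x) →
      List.foldl (fun acc x => acc.elim (some x) (fun m => if k1 m < k1 x then some x else some m))
        acc l =
      List.foldl (fun acc x => acc.elim (some x) (fun m => if k2 m < k2 x then some x else some m))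
        acc l := by
    intro l
    induction l with
    | nil => intro acc _ _; rfl
    | cons p l ih =>
      intro acc hl hacc
      cases acc with
      | none =>
        exact ih (some p) (fun x hx => hl x (List.mem_cons_of_mem _ hx))
          (fun x hx => by cases hx; exact hl p List.mem_cons_self)
      | some m =>
        have hm : k1 m = k2 m := hacc m rfl
        have hp : k1 p = k2 p := hl p List.mem_cons_self
        simp only [List.foldl_cons, Option.elim_some, hm, hp]
        exact ih _ (fun x hx => hl x (List.mem_cons_of_mem _ hx))
          (fun x hx => by split at hx <;> cases hx
                          · exact hp
                          · exact hm)
  exact key l none h (by simp)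

theorem pv_min?_congr {α κ : Type} [LT κ] [DecidableLT κ] (l : List α) (k1 k2 : α → κ)
    (h : ∀ x ∈ l, k1 x = k2 x) : PySem.List.min? l k1 = PySem.List.min? l k2 := by
  rw [pv_min?_elim, pv_min?_elim]
  have key : ∀ (l : List α) (acc : Option α), (∀ x ∈ l, k1 x = k2 x) →
      (∀ x, acc = some x → k1 x = k2 x) →
      List.foldl (fun acc x => acc.elim (some x) (fun m => if k1 x < k1 m then some x else some m))
        acc l =
      List.foldl (fun acc x => acc.elim (some x) (fun m => if k2 x < k2 m then some x else some m))
        acc l := by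
    intro l
    induction l with
    | nil => intro acc _ _; rfl
    | cons p l ih =>
      intro acc hl hacc
      cases acc with
      | none =>
        exact ih (some p) (fun x hx => hl x (List.mem_cons_of_mem _ hx))
          (fun x hx => by cases hx; exact hl p List.mem_cons_self)
      | some m =>
        have hm : k1 m = k2 m := hacc m rfl
        have hp : k1 p = k2 p := hl p List.mem_cons_self
        simp only [List.foldl_cons, Option.elim_some, hm, hp]
        exact ih _ (fun x hx => hl x (List.mem_cons_of_mem _ hx))
          (fun x hx => by split at hx <;> cases hx
                          · exact hp
                          · exact hm)
  exact key l none h (by simp)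

theorem pv_max?_isSome {α κ : Type} [LT κ] [DecidableLT κ] (l : List α) (k : α → κ)
    (h : l ≠ []) : (PySem.List.max? l k).isSome := by
  rw [pv_max?_elim]
  cases l with
  | nil => exact absurd rfl h
  | cons p l =>
    simp only [List.foldl_cons, Option.elim_none]
    have key : ∀ (l : List α) (m : α),
        (List.foldl (fun acc x => acc.elim (some x)
          (fun m => if k m < k x then some x else some m)) (some m) l).isSome := by
      intro l
      induction l with
      | nil => intro m; rfl
      | cons q l ih => intro m; simp only [List.foldl_cons, Option.elim_some]; split <;> exact ih _
    exact key l p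

theorem pv_min?_isSome {α κ : Type} [LT κ] [DecidableLT κ] (l : List α) (k : α → κ)
    (h : l ≠ []) : (PySem.List.min? l k).isSome := by
  rw [pv_min?_elim]
  cases l with
  | nil => exact absurd rfl h
  | cons p l =>
    simp only [List.foldl_cons, Option.elim_none]
    have key : ∀ (l : List α) (m : α),
        (List.foldl (fun acc x => acc.elim (some x)
          (fun m => if k x < k m then some x else some m)) (some m) l).isSome := by
      intro l
      induction l with
      | nil => intro m; rfl
      | cons q l ih => intro m; simp only [List.foldl_cons, Option.elim_some]; split <;> exact ih _
    exact key l p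

-- max/min over a dict's keys keyed by lookup = first of max/min over its items keyed by value
theorem pv_maxKey_eq (l : List (Int × Int)) (hnd : (l.map Prod.fst).Nodup) (hne : l ≠ []) :
    PySem.List.maxD (PySem.Dict.mk l).keys (fun c => (PySem.Dict.mk l).getD c 0) 0 =
      (PySem.List.maxD l (fun kv => kv.2) ((0 : Int), (0 : Int))).1 := by
  have hkeys : (PySem.Dict.mk l).keys = l.map Prod.fst := PySem.Dict.keys_mk l
  have hknd : (PySem.Dict.mk l).keys.Nodup := by rw [hkeys]; exact hnd
  unfold PySem.List.maxD
  rw [hkeys, pv_max?_map_fst]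
  rw [pv_max?_congr l _ (fun kv => kv.2) (fun p hp =>
    PySem.Dict.getD_of_mem_items (PySem.Dict.mk l) (by simpa using hp) hknd 0)]
  obtain ⟨m, hm⟩ := Option.isSome_iff_exists.mp (pv_max?_isSome l (fun kv => kv.2) hne)
  simp [hm]

theorem pv_minKey_eq (l : List (Int × Int)) (hnd : (l.map Prod.fst).Nodup) (hne : l ≠ []) :
    PySem.List.minD (PySem.Dict.mk l).keys (fun c => (PySem.Dict.mk l).getD c 0) 0 =
      (PySem.List.minD l (fun kv => kv.2) ((0 : Int), (0 : Int))).1 := by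
  have hkeys : (PySem.Dict.mk l).keys = l.map Prod.fst := PySem.Dict.keys_mk l
  have hknd : (PySem.Dict.mk l).keys.Nodup := by rw [hkeys]; exact hnd
  unfold PySem.List.minD
  rw [hkeys, pv_min?_map_fst]
  rw [pv_min?_congr l _ (fun kv => kv.2) (fun p hp =>
    PySem.Dict.getD_of_mem_items (PySem.Dict.mk l) (by simpa using hp) hknd 0)]
  obtain ⟨m, hm⟩ := Option.isSome_iff_exists.mp (pv_min?_isSome l (fun kv => kv.2) hne)
  simp [hm]

-- ---- minD/maxD of an appended element (Nat, identity key) ----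
theorem pv_minD_append (cs : List Nat) (j : Nat) (h : cs ≠ []) :
    PySem.List.minD (cs ++ [j]) (fun x => x) 0 = min (PySem.List.minD cs (fun x => x) 0) j := by
  obtain ⟨m, hm⟩ := Option.isSome_iff_exists.mp (pv_min?_isSome cs (fun x => x) h)
  unfold PySem.List.minD
  rw [pv_min?_elim, List.foldl_append, ← pv_min?_elim, hm]
  simp only [List.foldl_cons, List.foldl_nil, Option.elim_some]
  split <;> simp <;> omega

theorem pv_maxD_append (cs : List Nat) (j : Nat) (h : cs ≠ []) :
    PySem.List.maxD (cs ++ [j]) (fun x => x) 0 = max (PySem.List.maxD cs (fun x => x) 0) j := by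
  obtain ⟨m, hm⟩ := Option.isSome_iff_exists.mp (pv_max?_isSome cs (fun x => x) h)
  unfold PySem.List.maxD
  rw [pv_max?_elim, List.foldl_append, ← pv_max?_elim, hm]
  simp only [List.foldl_cons, List.foldl_nil, Option.elim_some]
  split <;> simp <;> omega

-- ---- writes as membership-marking ----
def pvWr (v : Int) (ps : List (Nat × Nat)) (g : List (List Int)) : List (List Int) :=
  ps.foldl (fun g p => pvSet g p.1 p.2 v) g

theorem pvWr_char (v : Int) (ps : List (Nat × Nat)) (g : List (List Int)) :
    pvWr v ps g = g.mapIdx (fun a r => r.mapIdx (fun b x => if (a, b) ∈ ps then v else x)) := by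
  induction ps generalizing g with
  | nil =>
    unfold pvWr
    simp only [List.foldl_nil, List.not_mem_nil, if_false]
    apply List.ext_getElem?
    intro a
    rw [List.getElem?_mapIdx]
    cases g[a]? with
    | none => rfl
    | some r =>
      simp only [Option.map_some, Option.some.injEq]
      apply List.ext_getElem?
      intro b
      rw [List.getElem?_mapIdx]
      cases r[b]? <;> rfl
  | cons p ps ih =>
    unfold pvWr at *
    rw [List.foldl_cons, ih]
    apply List.ext_getElem?
    intro a
    rw [List.getElem?_mapIdx, List.getElem?_mapIdx]
    unfold pvSet
    rw [List.getElem?_modify]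
    cases hg : g[a]? with
    | none => rfl
    | some r =>
      by_cases hai : p.1 = a
      · subst hai
        simp only [ite_true, Option.map_eq_map, Option.map_some, Option.some.injEq]
        apply List.ext_getElem?
        intro b
        rw [List.getElem?_mapIdx, List.getElem?_mapIdx, List.getElem?_set]
        by_cases hbj : p.2 = b
        · subst hbj
          by_cases hlen : p.2 < r.length
          · simp only [if_pos hlen]
            rw [List.getElem?_eq_getElem hlen]
            simp [List.mem_cons]
          · simp only [if_neg hlen]
            rw [List.getElem?_eq_none (by omega)]
            rfl
        · simp only [if_neg hbj]
          cases r[b]? with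
          | none => rfl
          | some x =>
            simp only [Option.map_some, Option.some.injEq]
            have : ((p.1, b) ∈ p :: ps) ↔ ((p.1, b) ∈ ps) := by
              constructor
              · intro hmem
                rcases List.mem_cons.mp hmem with heq | hmem'
                · exact absurd (congrArg Prod.snd heq).symm hbj
                · exact hmem'
              · exact List.mem_cons_of_mem _
            simp [this]
      · simp only [if_neg hai, Option.map_eq_map, Option.map_some, Option.some.injEq]
        congr 1
        funext b x
        have : ((a, b) ∈ p :: ps) ↔ ((a, b) ∈ ps) := by
          constructor
          · intro hmem
            rcases List.mem_cons.mp hmem with heq | hmem'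
            · exact absurd (congrArg Prod.fst heq).symm hai
            · exact hmem'
          · exact List.mem_cons_of_mem _
        simp [this]

theorem pvWr_perm (v : Int) {ps1 ps2 : List (Nat × Nat)} (hp : ps1.Perm ps2)
    (g : List (List Int)) : pvWr v ps1 g = pvWr v ps2 g := by
  rw [pvWr_char, pvWr_char]
  congr 1
  funext a r
  congr 1
  funext b x
  simp [hp.mem_iff]

theorem pvWr_append (v : Int) (ps1 ps2 : List (Nat × Nat)) (g : List (List Int)) :
    pvWr v (ps1 ++ ps2) g = pvWr v ps2 (pvWr v ps1 g) := List.foldl_append ..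

-- the write positions generated by one row / column extreme pair
def pvRowWr (w : Nat) (p : Nat × Nat × Nat) : List (Nat × Nat) :=
  (if 1 ≤ p.2.1 then [(p.1, p.2.1 - 1)] else []) ++
  (if p.2.2 + 1 < w then [(p.1, p.2.2 + 1)] else [])
def pvColWr (h : Nat) (p : Nat × Nat × Nat) : List (Nat × Nat) :=
  (if 1 ≤ p.2.1 then [(p.2.1 - 1, p.1)] else []) ++
  (if p.2.2 + 1 < h then [(p.2.2 + 1, p.1)] else [])

theorem pv_rowStep_eq (w : Nat) (t : Int) (out : List (List Int)) (i L R : Nat) :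
    pvRowStep w t out i L R = pvWr t (pvRowWr w (i, L, R)) out := by
  unfold pvRowStep pvRowWr pvWr
  split_ifs <;> rfl

theorem pv_colStep_eq (h : Nat) (t : Int) (out : List (List Int)) (j T B : Nat) :
    pvColStep h t out j T B = pvWr t (pvColWr h (j, T, B)) out := by
  unfold pvColStep pvColWr pvWr
  split_ifs <;> rfl

theorem pv_fold_rowStep (w : Nat) (t : Int) (ps : List (Nat × Nat × Nat)) (out : List (List Int)) :
    ps.foldl (fun out p => pvRowStep w t out p.1 p.2.1 p.2.2) out =
      pvWr t (ps.flatMap (pvRowWr w)) out := by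
  induction ps generalizing out with
  | nil => rfl
  | cons p ps ih =>
    rw [List.foldl_cons, List.flatMap_cons, pvWr_append, ih, pv_rowStep_eq]

theorem pv_fold_colStep (h : Nat) (t : Int) (ps : List (Nat × Nat × Nat)) (out : List (List Int)) :
    ps.foldl (fun out p => pvColStep h t out p.1 p.2.1 p.2.2) out =
      pvWr t (ps.flatMap (pvColWr h)) out := by
  induction ps generalizing out with
  | nil => rfl
  | cons p ps ih =>
    rw [List.foldl_cons, List.flatMap_cons, pvWr_append, ih, pv_colStep_eq]

-- ---- fold over a filterMap ----
theorem pv_foldl_filterMap {α β δ : Type} (l : List α) (f : α → Option β) (g : δ → β → δ)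
    (init : δ) :
    l.foldl (fun acc x => match f x with | none => acc | some b => g acc b) init =
      (l.filterMap f).foldl g init := by
  induction l generalizing init with
  | nil => rfl
  | cons a l ih => cases h : f a <;> simp [h, ih]

-- ---- the extreme-pair lists both programs realise ----
def pvRowExt (grid : List (List Int)) (border : Int) (w i : Nat) : Option (Nat × Nat) :=
  if pvColsOf grid border w i = [] then none
  else some (PySem.List.minD (pvColsOf grid border w i) (fun j => j) 0,
             PySem.List.maxD (pvColsOf grid border w i) (fun j => j) 0)
def pvColExt (grid : List (List Int)) (border : Int) (h j : Nat) : Option (Nat × Nat) :=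
  if pvRowsOf grid border h j = [] then none
  else some (PySem.List.minD (pvRowsOf grid border h j) (fun i => i) 0,
             PySem.List.maxD (pvRowsOf grid border h j) (fun i => i) 0)
def pvRowPairs (grid : List (List Int)) (border : Int) (h w : Nat) : List (Nat × Nat × Nat) :=
  (List.range h).filterMap (fun i => (pvRowExt grid border w i).map (fun q => (i, q)))
def pvColPairs (grid : List (List Int)) (border : Int) (h w : Nat) : List (Nat × Nat × Nat) :=
  (List.range w).filterMap (fun j => (pvColExt grid border h j).map (fun q => (j, q)))

theorem pv_colsOf_succ (grid : List (List Int)) (border : Int) (n i : Nat) :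
    pvColsOf grid border (n + 1) i =
      pvColsOf grid border n i ++ (if pvCell grid i n = border then [n] else []) := by
  unfold pvColsOf
  rw [List.range_succ, List.filter_append]
  congr 1
  by_cases hb : pvCell grid i n = border <;> simp [hb]

theorem pv_rowsOf_succ (grid : List (List Int)) (border : Int) (n j : Nat) :
    pvRowsOf grid border (n + 1) j =
      pvRowsOf grid border n j ++ (if pvCell grid n j = border then [n] else []) := by
  unfold pvRowsOf
  rw [List.range_succ, List.filter_append]
  congr 1
  by_cases hb : pvCell grid n j = border <;> simp [hb]

theorem pv_get?_mk (ps : List (Nat × (Nat × Nat))) (k : Nat) :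
    (PySem.Dict.mk ps).get? k = (ps.find? (fun p => p.1 == k)).map Prod.snd := rfl

theorem pv_scan_inner (grid : List (List Int)) (border : Int) (i : Nat)
    (r c : PySem.Dict Nat (Nat × Nat)) (hri : r.get? i = none) (hc : c.keys.Nodup) (n : Nat) :
    ((List.range n).foldl (fun st j => pvScanStep grid border st i j) (r, c)).1.items =
        r.items ++ ((pvRowExt grid border n i).map (fun q => (i, q))).toList
    ∧ (∀ j, ((List.range n).foldl (fun st j => pvScanStep grid border st i j) (r, c)).2.get? j =
        if j < n ∧ pvCell grid i j = border then
          some (match c.get? j with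
                | some TB => (min TB.1 i, max TB.2 i)
                | none => (i, i))
        else c.get? j)
    ∧ ((List.range n).foldl (fun st j => pvScanStep grid border st i j) (r, c)).2.keys.Nodup := by
  induction n with
  | zero =>
    refine ⟨?_, ?_, ?_⟩
    · simp [pvRowExt, pvColsOf]
    · intro j; simp
    · exact hc
  | succ n ih =>
    obtain ⟨ih1, ih2, ih3⟩ := ih
    rw [List.range_succ, List.foldl_append, List.foldl_cons, List.foldl_nil]
    set res := (List.range n).foldl (fun st j => pvScanStep grid border st i j) (r, c) with hres
    have hkeysr : ∀ p ∈ r.items, (p.1 == i) = false := by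
      intro p hp
      have : i ∉ r.keys := (PySem.Dict.get?_eq_none_iff_not_mem_keys r i).mp hri
      have hpk : p.1 ∈ r.keys := by
        have : r.keys = r.items.map Prod.fst := rfl
        rw [this]
        exact List.mem_map_of_mem hp
      simp only [beq_eq_false_iff_ne, ne_eq]
      intro hEq; exact this (hEq ▸ hpk)
    have hget_res1 : res.1.get? i =
        (pvRowExt grid border n i).map (fun q => q) := by
      have : res.1 = PySem.Dict.mk res.1.items := rfl
      rw [this, ih1, pv_get?_mk, List.find?_append]
      have hfr : r.items.find? (fun p => p.1 == i) = none :=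
        List.find?_eq_none.mpr (fun p hp => by simp [hkeysr p hp])
      rw [hfr]
      cases hext : pvRowExt grid border n i with
      | none => rfl
      | some q => simp
    by_cases hb : pvCell grid i n = border
    · -- border cell at column n
      have hcols_ne : pvColsOf grid border (n + 1) i ≠ [] := by
        rw [pv_colsOf_succ, if_pos hb]; simp
      have hstep : pvScanStep grid border res i n =
          (match res.1.get? i with
           | some LR => res.1.insert i (min LR.1 n, max LR.2 n)
           | none => res.1.insert i (n, n),
           match res.2.get? n with
           | some TB => res.2.insert n (min TB.1 i, max TB.2 i)
           | none => res.2.insert n (i, i)) := by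
        unfold pvScanStep; rw [if_pos hb]
      rw [hstep]
      have hc2n : res.2.get? n = c.get? n := by rw [ih2 n]; simp
      refine ⟨?_, ?_, ?_⟩
      · -- items of first component
        cases hext : pvRowExt grid border n i with
        | none =>
          have hcols : pvColsOf grid border n i = [] := by
            by_contra hne; simp [pvRowExt, hne] at hext
          have hg : res.1.get? i = none := by rw [hget_res1, hext]; rfl
          have hcontains : res.1.contains i = false := by
            have := PySem.Dict.contains_eq_isSome_get? res.1 i
            rw [hg] at this; simpa using this
          simp only [hg]
          rw [PySem.Dict.items_insert_of_not_contains res.1 _ hcontains, ih1, hext]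
          have : pvColsOf grid border (n+1) i = [n] := by
            rw [pv_colsOf_succ, if_pos hb, hcols]; rfl
          simp [pvRowExt, this, PySem.List.minD, PySem.List.maxD, PySem.List.min?,
            PySem.List.max?]
        | some q =>
          have hcols : pvColsOf grid border n i ≠ [] := by
            by_contra hne
            simp [pvRowExt, hne] at hext
          have hq : q = (PySem.List.minD (pvColsOf grid border n i) (fun j => j) 0,
                         PySem.List.maxD (pvColsOf grid border n i) (fun j => j) 0) := by
            simp [pvRowExt, hcols] at hext; exact hext.symm
          have hg : res.1.get? i = some q := by rw [hget_res1, hext]; rfl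
          have hcontains : res.1.contains i = true := by
            have := PySem.Dict.contains_eq_isSome_get? res.1 i
            rw [hg] at this; simpa using this
          simp only [hg]
          rw [PySem.Dict.items_insert_of_contains res.1 _ hcontains, ih1, hext]
          rw [List.map_append]
          have hmapr : r.items.map (fun p => if (p.1 == i) = true then (i, (min q.1 n, max q.2 n)) else p)
              = r.items := by
            have h1 : List.map
                (fun p => if (p.1 == i) = true then (i, (min q.1 n, max q.2 n)) else p) r.items =
                List.map id r.items :=
              List.map_congr_left (fun p hp => by simp [hkeysr p hp])
            rw [h1, List.map_id]
          rw [hmapr]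
          have : pvColsOf grid border (n+1) i = pvColsOf grid border n i ++ [n] := by
            rw [pv_colsOf_succ, if_pos hb]
          simp only [pvRowExt, this, hq]
          rw [pv_minD_append _ _ hcols, pv_maxD_append _ _ hcols]
          simp [hcols]
      · -- get? of second component
        intro j
        by_cases hj : j = n
        · subst hj
          cases hcn : c.get? j with
          | none =>
            rw [hc2n, hcn]
            simp only []
            rw [PySem.Dict.get?_insert_self]
            simp [hb]
          | some TB =>
            rw [hc2n, hcn]
            simp only []
            rw [PySem.Dict.get?_insert_self]
            simp [hb]
        · have : (match res.2.get? n with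
                  | some TB => res.2.insert n (min TB.1 i, max TB.2 i)
                  | none => res.2.insert n (i, i)).get? j = res.2.get? j := by
            cases res.2.get? n with
            | none => exact PySem.Dict.get?_insert_of_ne res.2 _ hj
            | some TB => exact PySem.Dict.get?_insert_of_ne res.2 _ hj
          rw [this, ih2 j]
          have : (j < n ∧ pvCell grid i j = border) ↔ (j < n + 1 ∧ pvCell grid i j = border) := by
            constructor
            · rintro ⟨h1, h2⟩; exact ⟨by omega, h2⟩
            · rintro ⟨h1, h2⟩; exact ⟨by omega, h2⟩
          rw [if_congr this rfl rfl]
      · -- nodup keys of second component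
        cases res.2.get? n with
        | none => exact PySem.Dict.nodup_keys_insert res.2 _ _ ih3
        | some TB => exact PySem.Dict.nodup_keys_insert res.2 _ _ ih3
    · -- not a border cell at column n
      have hstep : pvScanStep grid border res i n = res := by
        unfold pvScanStep; rw [if_neg hb]
      rw [hstep]
      have hcols : pvColsOf grid border (n+1) i = pvColsOf grid border n i := by
        rw [pv_colsOf_succ, if_neg hb, List.append_nil]
      refine ⟨?_, ?_, ih3⟩
      · rw [ih1]
        simp [pvRowExt, hcols]
      · intro j
        rw [ih2 j]
        congr 1
        by_cases hj : j = n
        · subst hj; simp [hb]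
        · simp only [eq_iff_iff]
          constructor
          · rintro ⟨h1, h2⟩; exact ⟨by omega, h2⟩
          · rintro ⟨h1, h2⟩
            refine ⟨by omega, h2⟩

theorem pv_scan_outer (grid : List (List Int)) (border : Int) (w n : Nat) :
    ((List.range n).foldl (fun st i =>
        (List.range w).foldl (fun st j => pvScanStep grid border st i j) st)
        (PySem.Dict.empty, PySem.Dict.empty)).1.items = pvRowPairs grid border n w
    ∧ (∀ j, ((List.range n).foldl (fun st i =>
        (List.range w).foldl (fun st j => pvScanStep grid border st i j) st)
        (PySem.Dict.empty, PySem.Dict.empty)).2.get? j =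
          if j < w then pvColExt grid border n j else none)
    ∧ ((List.range n).foldl (fun st i =>
        (List.range w).foldl (fun st j => pvScanStep grid border st i j) st)
        (PySem.Dict.empty, PySem.Dict.empty)).2.keys.Nodup := by
  induction n with
  | zero =>
    refine ⟨rfl, ?_, ?_⟩
    · intro j
      have : PySem.Dict.empty.get? (κ := Nat) (ν := Nat × Nat) j = none := PySem.Dict.get?_empty j
      rw [List.range_zero, List.foldl_nil, this]
      have hce : pvColExt grid border 0 j = none := by simp [pvColExt, pvRowsOf]
      rw [hce]; simp
    · simp [PySem.Dict.keys, PySem.Dict.empty]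
  | succ n ih =>
    obtain ⟨ih1, ih2, ih3⟩ := ih
    rw [List.range_succ, List.foldl_append, List.foldl_cons, List.foldl_nil]
    set st := (List.range n).foldl (fun st i =>
        (List.range w).foldl (fun st j => pvScanStep grid border st i j) st)
        (PySem.Dict.empty, PySem.Dict.empty) with hst
    have hrn : st.1.get? n = none := by
      rw [PySem.Dict.get?_eq_none_iff_not_mem_keys]
      intro hmem
      have : st.1.keys = st.1.items.map Prod.fst := rfl
      rw [this, ih1] at hmem
      obtain ⟨p, hp, hpk⟩ := List.mem_map.mp hmem
      obtain ⟨i, hi, hfi⟩ := List.mem_filterMap.mp hp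
      cases hext : pvRowExt grid border w i with
      | none => rw [hext] at hfi; simp at hfi
      | some q =>
        rw [hext] at hfi
        simp only [Option.map_some, Option.some.injEq] at hfi
        rw [← hfi] at hpk
        simp at hpk
        rw [hpk] at hi
        simp at hi
    have hinner := pv_scan_inner grid border n st.1 st.2 hrn ih3 w
    obtain ⟨hin1, hin2, hin3⟩ := hinner
    have hfold_eq : (List.range w).foldl (fun st j => pvScanStep grid border st n j) st =
        (List.range w).foldl (fun st j => pvScanStep grid border st n j) (st.1, st.2) := by rfl
    refine ⟨?_, ?_, ?_⟩
    · rw [hfold_eq, hin1, ih1]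
      unfold pvRowPairs
      rw [List.range_succ, List.filterMap_append]
      congr 1

    · intro j
      rw [hfold_eq, hin2 j, ih2 j]
      by_cases hjw : j < w
      · simp only [if_pos hjw]
        by_cases hbj : pvCell grid n j = border
        · rw [if_pos ⟨hjw, hbj⟩]
          have hrows : pvRowsOf grid border (n+1) j = pvRowsOf grid border n j ++ [n] := by
            rw [pv_rowsOf_succ, if_pos hbj]
          cases hre : pvRowsOf grid border n j with
          | nil =>
            have h0 : pvColExt grid border n j = none := by simp [pvColExt, hre]
            have h1 : pvColExt grid border (n+1) j = some (n, n) := by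
              simp only [pvColExt, hrows, hre, List.nil_append]
              simp [PySem.List.minD, PySem.List.maxD, PySem.List.min?, PySem.List.max?]
            rw [h0, h1]
          | cons a l =>
            have hne : pvRowsOf grid border n j ≠ [] := by rw [hre]; simp
            have h0 : pvColExt grid border n j =
                some (PySem.List.minD (pvRowsOf grid border n j) (fun i => i) 0,
                      PySem.List.maxD (pvRowsOf grid border n j) (fun i => i) 0) := by
              simp [pvColExt, hne]
            have h1 : pvColExt grid border (n+1) j =
                some (min (PySem.List.minD (pvRowsOf grid border n j) (fun i => i) 0) n,
                      max (PySem.List.maxD (pvRowsOf grid border n j) (fun i => i) 0) n) := by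
              simp only [pvColExt, hrows]
              rw [pv_minD_append _ _ hne, pv_maxD_append _ _ hne]
              simp [hne]
            rw [h0, h1]
        · rw [if_neg (by rintro ⟨_, hcc⟩; exact hbj hcc)]
          have hrows : pvRowsOf grid border (n+1) j = pvRowsOf grid border n j := by
            rw [pv_rowsOf_succ, if_neg hbj, List.append_nil]
          simp [pvColExt, hrows]
      · simp only [if_neg hjw]
        rw [if_neg (by rintro ⟨hjw', _⟩; exact hjw hjw')]
    · rw [hfold_eq]; exact hin3

theorem pv_colPairs_keys_sublist (grid : List (List Int)) (border : Int) (h w : Nat) :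
    ((pvColPairs grid border h w).map Prod.fst).Sublist (List.range w) := by
  unfold pvColPairs
  generalize List.range w = l
  induction l with
  | nil => simp
  | cons j l ih =>
    rw [List.filterMap_cons]
    cases hext : pvColExt grid border h j with
    | none => simpa using ih.cons j
    | some q => simpa using ih.cons₂ j

theorem pv_mem_colPairs (grid : List (List Int)) (border : Int) (h w : Nat) (k : Nat)
    (v : Nat × Nat) :
    (k, v) ∈ pvColPairs grid border h w ↔ k < w ∧ pvColExt grid border h k = some v := by
  unfold pvColPairs
  rw [List.mem_filterMap]
  constructor
  · rintro ⟨j, hj, hfj⟩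
    cases hext : pvColExt grid border h j with
    | none => rw [hext] at hfj; simp at hfj
    | some q =>
      rw [hext] at hfj
      simp only [Option.map_some, Option.some.injEq, Prod.mk.injEq] at hfj
      obtain ⟨h1, h2⟩ := hfj
      subst h1
      subst h2
      exact ⟨List.mem_range.mp hj, hext⟩
  · rintro ⟨hkw, hext⟩
    exact ⟨k, List.mem_range.mpr hkw, by rw [hext]; rfl⟩

theorem pv_colItems_perm (grid : List (List Int)) (border : Int) (h w : Nat) :
    ((List.range h).foldl (fun st i =>
        (List.range w).foldl (fun st j => pvScanStep grid border st i j) st)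
        (PySem.Dict.empty, PySem.Dict.empty)).2.items.Perm (pvColPairs grid border h w) := by
  obtain ⟨_, hget, hnd⟩ := pv_scan_outer grid border w h
  set d := ((List.range h).foldl (fun st i =>
        (List.range w).foldl (fun st j => pvScanStep grid border st i j) st)
        (PySem.Dict.empty, PySem.Dict.empty)).2 with hd
  have hnd_items : d.items.Nodup := by
    have : d.keys = d.items.map Prod.fst := rfl
    exact List.Nodup.of_map _ (this ▸ hnd)
  have hnd_cp : (pvColPairs grid border h w).Nodup :=
    List.Nodup.of_map _ ((pv_colPairs_keys_sublist grid border h w).nodup (List.nodup_range))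
  rw [List.perm_ext_iff_of_nodup hnd_items hnd_cp]
  intro p
  obtain ⟨k, v⟩ := p
  rw [pv_mem_colPairs]
  rw [← PySem.Dict.get?_eq_some_iff_mem_items d k v hnd, hget k]
  by_cases hkw : k < w
  · simp [hkw]
  · simp [hkw]

-- ---- main assembly ----
theorem pv_map_const_range {x : Int} (n : Nat) :
    (List.range n).map (fun _ => x) = List.replicate n x := by
  apply List.ext_getElem?
  intro i
  rw [List.getElem?_map]
  by_cases hi : i < n
  · simp [hi]
  · simp [hi]

theorem pv_main (grid : List (List Int)) (hpre : Pre_transform grid) :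
    transform grid = transform_alt grid := by
  obtain ⟨hg0, hlen, a, ha, b, hb, hab⟩ := hpre
  simp only [transform, transform_alt]
  have hflat : grid.flatMap (fun row => row) = grid.flatten := by simp
  have hcounts : grid.foldl
      (fun d row => row.foldl (fun d c => d.modify c 0 (fun n => n + 1)) d)
      PySem.Dict.empty = PySem.Dict.counter grid.flatten := by
    rw [PySem.Dict.counter_eq_foldl, ← List.foldl_flatten]
  rw [hflat, hcounts]
  set F := PySem.Dict.counter grid.flatten with hF
  set bg := (PySem.List.maxD F.items (fun kv => kv.2) ((0 : Int), (0 : Int))).1 with hbg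
  set l := F.items.filter (fun kv => !(kv.1 == bg)) with hl
  have hndF : (F.items.map Prod.fst).Nodup := by
    rw [hF, PySem.Dict.items_counter]
    rw [List.map_map]
    have : (Prod.fst ∘ fun k => (k, ((List.count k grid.flatten : Nat) : Int))) = id := by
      funext k; rfl
    rw [this, List.map_id]
    exact PySem.Set.nodup_ofList grid.flatten
  have hnd : (l.map Prod.fst).Nodup := by
    have hsub : (l.map Prod.fst).Sublist (F.items.map Prod.fst) := by
      simp only [hl]
      exact List.Sublist.map Prod.fst List.filter_sublist
    exact hndF.sublist hsub
  have hlne : l ≠ [] := by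
    have hc : ∃ c ∈ grid.flatten, c ≠ bg := by
      by_cases hA : a = bg
      · exact ⟨b, hb, fun hEq => hab (hA.trans hEq.symm)⟩
      · exact ⟨a, ha, hA⟩
    obtain ⟨c, hcmem, hcne⟩ := hc
    have hmemF : (c, ((List.count c grid.flatten : Nat) : Int)) ∈ F.items := by
      rw [hF, PySem.Dict.items_counter]
      exact List.mem_map_of_mem ((PySem.Set.mem_ofList grid.flatten c).mpr hcmem)
    have : (c, ((List.count c grid.flatten : Nat) : Int)) ∈ l := by
      rw [hl]
      refine List.mem_filter.mpr ⟨hmemF, ?_⟩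
      simp [hcne]
    exact List.ne_nil_of_mem this
  rw [pv_maxKey_eq l hnd hlne, pv_minKey_eq l hnd hlne]
  set border := (PySem.List.maxD l (fun kv => kv.2) ((0 : Int), (0 : Int))).1 with hborder
  set target := (PySem.List.minD l (fun kv => kv.2) ((0 : Int), (0 : Int))).1 with htarget
  set h := grid.length with hh
  set w := (grid.headD []).length with hw
  rw [pv_map_const_range w]
  set out0 := (List.range h).map (fun _ => List.replicate w bg) with hout0
  -- A's two phases as pvWr over the pair lists
  have hA_row : ∀ out : List (List Int), (List.range h).foldl (fun out i =>
      if pvColsOf grid border w i = [] then out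
      else pvRowStep w target out i
        (PySem.List.minD (pvColsOf grid border w i) (fun j => j) 0)
        (PySem.List.maxD (pvColsOf grid border w i) (fun j => j) 0)) out =
      pvWr target ((pvRowPairs grid border h w).flatMap (pvRowWr w)) out := by
    intro out
    rw [← pv_fold_rowStep]
    unfold pvRowPairs
    rw [← pv_foldl_filterMap]
    congr 1
    funext out i
    by_cases hc : pvColsOf grid border w i = []
    · simp [pvRowExt, hc]
    · simp [pvRowExt, hc]
  have hA_col : ∀ out : List (List Int), (List.range w).foldl (fun out j =>
      if pvRowsOf grid border h j = [] then out
      else pvColStep h target out j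
        (PySem.List.minD (pvRowsOf grid border h j) (fun i => i) 0)
        (PySem.List.maxD (pvRowsOf grid border h j) (fun i => i) 0)) out =
      pvWr target ((pvColPairs grid border h w).flatMap (pvColWr h)) out := by
    intro out
    rw [← pv_fold_colStep]
    unfold pvColPairs
    rw [← pv_foldl_filterMap]
    congr 1
    funext out j
    by_cases hc : pvRowsOf grid border h j = []
    · simp [pvColExt, hc]
    · simp [pvColExt, hc]
  rw [hA_row, hA_col]
  -- B's two phases
  obtain ⟨hB1, _, _⟩ := pv_scan_outer grid border w h
  rw [hB1, pv_fold_rowStep, pv_fold_colStep]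
  rw [← pvWr_append, ← pvWr_append]
  refine pvWr_perm target ?_ out0
  exact (List.Perm.append_left _
    ((pv_colItems_perm grid border h w).flatMap (fun a _ => List.Perm.refl _))).symm

-- ===== VERDICT (by name: the statement is the Claim_ definition above) =====
theorem transform_spec : Claim_equal_transform := by
  intro grid _ hpre
  unfold Spec_transform
  exact pv_main grid hpre
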